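-- pv_equiv track=rewrite | github.com/IrinaTikhonova/PY110_HW5 | Tasks/Task4.py | get_strong_string
-- ===== SOURCE A (Python) =====
-- def get_strong_string(str_: str):
--     data = str_.split()
--     dict_of_results = {}
--     for word in data:
--         word_strong = 0
--         for ch in word:
--             if ch.isalpha():
--                 word_strong += ord(ch)
--
--         dict_of_results[word_strong] = word
--     max_val = max(dict_of_results.items())
--     return f"Слово {max_val[1]} победило, набрав {max_val[0]} баллов"
-- ===== SOURCE B (Python) =====
-- def get_strong_string(str_: str):
--     words = str_.split()
--
--     def strength(w):
--         return sum(ord(c) for c in w if c.isalpha())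
--
--     best = max(reversed(words), key=strength)
--     return f"Слово {best} победило, набрав {strength(best)} баллов"
-- ===== Notes on version B (the rewrite author's own statement) =====
-- stated objective: simpler
-- what changed: Drops the strength->word dict and the tuple-max over its items: B selects the winner directly with max(reversed(words), key=strength), where reversed reproduces A's last-wins dict-overwrite tie-break.
import Mathlib
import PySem

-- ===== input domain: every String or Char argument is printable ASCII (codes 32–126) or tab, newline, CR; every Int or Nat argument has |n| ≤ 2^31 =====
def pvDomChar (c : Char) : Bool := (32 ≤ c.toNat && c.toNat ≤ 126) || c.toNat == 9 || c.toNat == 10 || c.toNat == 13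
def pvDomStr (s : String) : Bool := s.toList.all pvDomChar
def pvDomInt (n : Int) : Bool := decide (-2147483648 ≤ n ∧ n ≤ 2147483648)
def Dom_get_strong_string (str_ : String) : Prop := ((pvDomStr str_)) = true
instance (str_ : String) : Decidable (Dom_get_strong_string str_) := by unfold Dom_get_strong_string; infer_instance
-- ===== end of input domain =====

-- B replaces A's strength->word dict and tuple-max over its items by a direct
-- max over the reversed word list with a key function (objective: simpler).

-- ===== PORT A =====
-- inner 'for ch in word' loop of A
def pvWordStrong (w : String) : Int :=
  w.toList.foldl (fun acc ch => if PySem.Chars.isalpha ch then acc + (ch.toNat : Int) else acc) 0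

def get_strong_string (str_ : String) : String :=
  let data := PySem.Str.split₀ str_
  let dict_of_results :=
    data.foldl (fun d word => d.insert (pvWordStrong word) word) PySem.Dict.empty
  match PySem.List.max2? dict_of_results.items (fun p => p.1) (fun p => p.2) with
  | some max_val =>
      "Слово " ++ max_val.2 ++ " победило, набрав " ++ PySem.Int.toStr max_val.1 ++ " баллов"
  | none => ""   -- unreachable under Pre_: Python's max([]) raises ValueError

-- ===== PORT B =====
-- strength(w) = sum(ord(c) for c in w if c.isalpha())
def pvStrength (w : String) : Int :=
  ((w.toList.filter PySem.Chars.isalpha).map (fun c => (c.toNat : Int))).sum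

def get_strong_string_alt (str_ : String) : String :=
  let words := PySem.Str.split₀ str_
  match PySem.List.max? words.reverse pvStrength with
  | some best =>
      "Слово " ++ best ++ " победило, набрав " ++ PySem.Int.toStr (pvStrength best) ++ " баллов"
  | none => ""   -- unreachable under Pre_: Python's max of an empty iterable raises ValueError

-- ===== PRECONDITION & SPEC =====
-- Pre_ excludes only strings with no words (str_.split() == []), on which both A and B raise ValueError.
def Pre_get_strong_string (str_ : String) : Prop := PySem.Str.split₀ str_ ≠ []
instance (str_ : String) : Decidable (Pre_get_strong_string str_) := by unfold Pre_get_strong_string; infer_instance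
def pvWitness_get_strong_string : String := "ab ba"

def Spec_get_strong_string (str_ : String) (out : String) : Prop := out = get_strong_string_alt str_
instance (str_ : String) (out : String) : Decidable (Spec_get_strong_string str_ out) := by unfold Spec_get_strong_string; infer_instance

-- ===== CLAIM (what is proved, stated in full; the proofs are below) =====
def Claim_equal_get_strong_string : Prop := ∀ (str_ : String), Dom_get_strong_string str_ → Pre_get_strong_string str_ → Spec_get_strong_string str_ (get_strong_string str_)

-- ===== LEMMAS AND PROOFS =====

-- A's per-word strength loop computes B's strength sum
theorem pvWordStrong_eq (w : String) : pvWordStrong w = pvStrength w := by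
  unfold pvWordStrong pvStrength
  rw [PySem.List.foldl_if_eq_foldl_filter PySem.Chars.isalpha
        (fun acc ch => acc + (ch.toNat : Int)),
      PySem.List.foldl_add]
  simp

-- reference selector: last word of maximal strength (forward fold, ties go to the later word)
def pvStep (acc : Option String) (w : String) : Option String :=
  match acc with
  | none => some w
  | some m => if pvStrength m ≤ pvStrength w then some w else some m

def pvSel (ws : List String) : Option String := ws.foldl pvStep none

theorem pvStep_none (w : String) : pvStep none w = some w := rfl
theorem pvStep_some (m w : String) :
    pvStep (some m) w = if pvStrength m ≤ pvStrength w then some w else some m := rfl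

theorem pvSel_append (ws : List String) (w : String) :
    pvSel (ws ++ [w]) = pvStep (pvSel ws) w := by
  simp [pvSel]

theorem pvSelAux_isSome (t : List String) (a : String) :
    ∃ m, t.foldl pvStep (some a) = some m := by
  induction t generalizing a with
  | nil => exact ⟨a, rfl⟩
  | cons x t ih =>
      simp only [List.foldl_cons, pvStep_some]
      split_ifs <;> exact ih _

theorem pvSel_eq_none_iff (ws : List String) : pvSel ws = none ↔ ws = [] := by
  cases ws with
  | nil => simp [pvSel]
  | cons x t =>
      simp only [pvSel, List.foldl_cons, pvStep_none]
      constructor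
      · intro h
        obtain ⟨m, hm⟩ := pvSelAux_isSome t x
        rw [hm] at h; cases h
      · intro h; cases h

theorem pvSelAux_max (t : List String) (a m : String)
    (h : t.foldl pvStep (some a) = some m) :
    pvStrength a ≤ pvStrength m ∧ ∀ y ∈ t, pvStrength y ≤ pvStrength m := by
  induction t generalizing a with
  | nil => simp at h; simp [h]
  | cons x t ih =>
      simp only [List.foldl_cons, pvStep_some] at h
      split_ifs at h with hc
      · obtain ⟨h1, h2⟩ := ih x h
        refine ⟨le_trans hc h1, ?_⟩
        intro y hy
        rcases List.mem_cons.1 hy with rfl | hy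
        · exact h1
        · exact h2 y hy
      · obtain ⟨h1, h2⟩ := ih a h
        refine ⟨h1, ?_⟩
        intro y hy
        rcases List.mem_cons.1 hy with rfl | hy
        · exact le_trans (le_of_lt (lt_of_not_ge hc)) h1
        · exact h2 y hy

theorem pvSel_max (ws : List String) (m : String) (h : pvSel ws = some m) :
    ∀ y ∈ ws, pvStrength y ≤ pvStrength m := by
  cases ws with
  | nil => simp [pvSel] at h
  | cons x t =>
      simp only [pvSel, List.foldl_cons, pvStep_none] at h
      obtain ⟨h1, h2⟩ := pvSelAux_max t x m h
      intro y hy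
      rcases List.mem_cons.1 hy with rfl | hy
      · exact h1
      · exact h2 y hy

-- ===== B side: max over the reversed list is the last-wins selector =====

-- the fold step of PySem.List.max? with key pvStrength
def pvStepM (acc : Option String) (x : String) : Option String :=
  match acc with
  | none => some x
  | some m => if pvStrength m < pvStrength x then some x else some m

theorem pvStepM_none (x : String) : pvStepM none x = some x := rfl
theorem pvStepM_some (m x : String) :
    pvStepM (some m) x = if pvStrength m < pvStrength x then some x else some m := rfl

theorem pvMax?_eq_foldl (l : List String) :
    PySem.List.max? l pvStrength = l.foldl pvStepM none := by
  unfold PySem.List.max?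
  congr 1
  funext acc x
  cases acc <;> rfl

theorem pvMaxAux (t : List String) (a : String) :
    t.foldl pvStepM (some a)
      = match t.foldl pvStepM none with
        | none => some a
        | some m => if pvStrength a < pvStrength m then some m else some a := by
  induction t generalizing a with
  | nil => rfl
  | cons x t ih =>
      simp only [List.foldl_cons, pvStepM_none, pvStepM_some]
      rw [ih x]
      by_cases hax : pvStrength a < pvStrength x
      · rw [if_pos hax, ih x]
        cases hmx : t.foldl pvStepM none with
        | none => simp [hax]
        | some m =>
            by_cases hxm : pvStrength x < pvStrength m
            · simp [hxm, lt_trans hax hxm]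
            · simp [hxm, hax]
      · rw [if_neg hax, ih a]
        cases hmx : t.foldl pvStepM none with
        | none => simp [hax]
        | some m =>
            by_cases hxm : pvStrength x < pvStrength m
            · by_cases ham : pvStrength a < pvStrength m
              · simp [hxm, ham]
              · simp [hxm, ham]
            · have ham : ¬ pvStrength a < pvStrength m :=
                fun h => hxm (lt_of_le_of_lt (le_of_not_gt hax) h)
              simp [hxm, ham, hax]

theorem pvMaxRev_eq_sel (ws : List String) :
    PySem.List.max? ws.reverse pvStrength = pvSel ws := by
  induction ws using List.reverseRecOn with
  | nil => rfl
  | append_singleton ws w ih =>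
      rw [pvSel_append]
      rw [pvMax?_eq_foldl] at ih ⊢
      rw [List.reverse_append, List.reverse_singleton, List.singleton_append,
          List.foldl_cons, pvStepM_none, pvMaxAux, ih]
      cases hs : pvSel ws with
      | none => rfl
      | some m =>
          simp only [pvStep_some]
          by_cases h : pvStrength m ≤ pvStrength w
          · rw [if_pos h]
            simp only [if_neg (not_lt_of_ge h)]
          · rw [if_neg h]
            simp only [if_pos (lt_of_not_ge h)]

-- ===== A side: the dict holds each strength's last word; its max item is the selector's pair =====

def pvDict (ws : List String) : PySem.Dict Int String :=
  ws.foldl (fun d w => d.insert (pvStrength w) w) PySem.Dict.empty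

theorem pvDict_append (ws : List String) (w : String) :
    pvDict (ws ++ [w]) = (pvDict ws).insert (pvStrength w) w := by
  simp [pvDict]

theorem pvDict_nodup (ws : List String) : (pvDict ws).keys.Nodup := by
  induction ws using List.reverseRecOn with
  | nil => exact PySem.Dict.nodup_keys_empty
  | append_singleton ws w ih =>
      rw [pvDict_append]
      exact PySem.Dict.nodup_keys_insert _ _ _ ih

theorem pvDict_key_bound (ws : List String) :
    ∀ p ∈ (pvDict ws).items, ∃ w ∈ ws, p.1 = pvStrength w := by
  induction ws using List.reverseRecOn with
  | nil => intro p hp; simp [pvDict, PySem.Dict.empty] at hp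
  | append_singleton ws w ih =>
      intro p hp
      rw [pvDict_append] at hp
      rcases (PySem.Dict.mem_items_insert _ _ _ _).1 hp with rfl | ⟨hp', _⟩
      · exact ⟨w, by simp⟩
      · obtain ⟨w', hw', h⟩ := ih p hp'
        exact ⟨w', by simp [hw'], h⟩

theorem pvDict_get_last (ws : List String) (m : String) (h : pvSel ws = some m) :
    (pvDict ws).get? (pvStrength m) = some m := by
  induction ws using List.reverseRecOn with
  | nil => simp [pvSel] at h
  | append_singleton ws w ih =>
      rw [pvSel_append] at h
      rw [pvDict_append]
      cases hs : pvSel ws with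
      | none =>
          rw [hs, pvStep_none] at h
          cases h
          exact PySem.Dict.get?_insert_self _ _ _
      | some m0 =>
          rw [hs, pvStep_some] at h
          split_ifs at h with hc
          · cases h
            exact PySem.Dict.get?_insert_self _ _ _
          · cases h
            have hne : pvStrength m ≠ pvStrength w := fun he => hc (le_of_eq he)
            rw [PySem.Dict.get?_insert_of_ne _ _ hne]
            exact ih hs

-- ===== max2? over a list whose maximal key is unique picks that pair =====

-- the fold step of PySem.List.max2? with keys (·.1), (·.2)
def pvStep2 (acc : Option (Int × String)) (x : Int × String) : Option (Int × String) :=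
  match acc with
  | none => some x
  | some m =>
      if (decide (m.1 < x.1) || !decide (x.1 < m.1) && decide (m.2 < x.2)) = true
      then some x else some m

theorem pvMax2?_eq_foldl (l : List (Int × String)) :
    PySem.List.max2? l (fun q => q.1) (fun q => q.2) = l.foldl pvStep2 none := by
  unfold PySem.List.max2?
  congr 1
  funext acc x
  cases acc <;> rfl

theorem pvStep2_lt (m x : Int × String) (h : x.1 < m.1) : pvStep2 (some m) x = some m := by
  simp [pvStep2, not_lt_of_gt h, h]

theorem pvStep2_gt (m x : Int × String) (h : m.1 < x.1) : pvStep2 (some m) x = some x := by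
  simp [pvStep2, h]

theorem pvStep2_some (m x : Int × String) :
    pvStep2 (some m) x
      = if (decide (m.1 < x.1) || !decide (x.1 < m.1) && decide (m.2 < x.2)) = true
        then some x else some m := rfl

theorem pvStep2_cases (m x : Int × String) :
    pvStep2 (some m) x = some x ∨ pvStep2 (some m) x = some m := by
  rw [pvStep2_some]
  split_ifs <;> simp

theorem pvMax2Aux_keep (t : List (Int × String)) (m : Int × String)
    (h : ∀ q ∈ t, q.1 < m.1) :
    t.foldl pvStep2 (some m) = some m := by
  induction t with
  | nil => rfl
  | cons x t ih =>
      rw [List.foldl_cons, pvStep2_lt m x (h x (by simp))]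
      exact ih (fun q hq => h q (by simp [hq]))

theorem pvMax2Aux_find (t : List (Int × String)) (m p : Int × String)
    (hnd : (t.map Prod.fst).Nodup)
    (hp : p ∈ t) (hmax : ∀ q ∈ t, q ≠ p → q.1 < p.1) (hm : m.1 < p.1) :
    t.foldl pvStep2 (some m) = some p := by
  induction t generalizing m with
  | nil => cases hp
  | cons y t ih =>
      rw [List.foldl_cons]
      by_cases hyp : y = p
      · subst hyp
        rw [pvStep2_gt m y hm]
        apply pvMax2Aux_keep
        intro q hq
        by_cases hqy : q = y
        · exfalso
          have : y.1 ∈ t.map Prod.fst := hqy ▸ List.mem_map_of_mem hq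
          exact (List.nodup_cons.1 hnd).1 this
        · exact hmax q (List.mem_cons_of_mem _ hq) hqy
      · have hy : y.1 < p.1 := hmax y List.mem_cons_self hyp
        have hp' : p ∈ t := by
          rcases List.mem_cons.1 hp with rfl | h
          · exact absurd rfl hyp
          · exact h
        have hmax' : ∀ q ∈ t, q ≠ p → q.1 < p.1 :=
          fun q hq hqp => hmax q (List.mem_cons_of_mem _ hq) hqp
        rcases pvStep2_cases m y with h2 | h2
        · rw [h2]
          exact ih _ (List.nodup_cons.1 hnd).2 hp' hmax' hy
        · rw [h2]
          exact ih _ (List.nodup_cons.1 hnd).2 hp' hmax' hm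

theorem pvMax2_unique (l : List (Int × String)) (p : Int × String)
    (hnd : (l.map Prod.fst).Nodup)
    (hp : p ∈ l) (hmax : ∀ q ∈ l, q ≠ p → q.1 < p.1) :
    PySem.List.max2? l (fun q => q.1) (fun q => q.2) = some p := by
  cases l with
  | nil => cases hp
  | cons x t =>
      rw [pvMax2?_eq_foldl, List.foldl_cons]
      rw [show pvStep2 none x = some x from rfl]
      by_cases hxp : x = p
      · subst hxp
        apply pvMax2Aux_keep
        intro q hq
        by_cases hqx : q = x
        · exfalso
          have : x.1 ∈ t.map Prod.fst := hqx ▸ List.mem_map_of_mem hq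
          exact (List.nodup_cons.1 hnd).1 this
        · exact hmax q (List.mem_cons_of_mem _ hq) hqx
      · have hx : x.1 < p.1 := hmax x List.mem_cons_self hxp
        have hp' : p ∈ t := by
          rcases List.mem_cons.1 hp with rfl | h
          · exact absurd rfl hxp
          · exact h
        exact pvMax2Aux_find t x p (List.nodup_cons.1 hnd).2 hp'
          (fun q hq hqp => hmax q (List.mem_cons_of_mem _ hq) hqp) hx

-- main A-side lemma
theorem pvMax2_dict (ws : List String) :
    PySem.List.max2? (pvDict ws).items (fun q => q.1) (fun q => q.2)
      = (pvSel ws).map (fun m => (pvStrength m, m)) := by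
  cases hs : pvSel ws with
  | none =>
      rw [(pvSel_eq_none_iff ws).1 hs]
      rfl
  | some m =>
      simp only [Option.map_some]
      apply pvMax2_unique
      · have := pvDict_nodup ws
        simpa [PySem.Dict.keys] using this
      · exact PySem.Dict.mem_items_of_get?_eq_some _ (pvDict_get_last ws m hs)
      · intro q hq hne
        obtain ⟨w', hw', hk⟩ := pvDict_key_bound ws q hq
        have hle : q.1 ≤ pvStrength m := hk ▸ pvSel_max ws m hs w' hw'
        rcases lt_or_eq_of_le hle with hlt | heq
        · exact hlt
        · exfalso
          apply hne
          have hget : (pvDict ws).get? q.1 = some q.2 :=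
            PySem.Dict.get?_of_mem_items _ hq (pvDict_nodup ws)
          rw [heq, pvDict_get_last ws m hs] at hget
          have h2 : q.2 = m := (Option.some_inj.mp hget).symm
          exact Prod.ext_iff.mpr ⟨heq, h2⟩

-- ===== VERDICT (by name: the statement is the Claim_ definition above) =====
theorem get_strong_string_spec : Claim_equal_get_strong_string := by
  intro str_ _hdom hpre
  unfold Spec_get_strong_string get_strong_string get_strong_string_alt
  simp only [pvWordStrong_eq]
  rw [show (PySem.Str.split₀ str_).foldl (fun d word => d.insert (pvStrength word) word) PySem.Dict.empty
        = pvDict (PySem.Str.split₀ str_) from rfl]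
  rw [pvMax2_dict, pvMaxRev_eq_sel]
  cases hs : pvSel (PySem.Str.split₀ str_) with
  | none => exact absurd ((pvSel_eq_none_iff _).1 hs) hpre
  | some m => rfl
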